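-- pv_equiv track=rewrite | github.com/lucoby/aoc2022 | d18/p2.py | get_sf
-- ===== SOURCE A (Python) =====
-- def get_sf(all_p):
--     adj = [
--         (1, 0, 0),
--         (-1, 0, 0),
--         (0, 1, 0,),
--         (0, -1, 0,),
--         (0, 0, 1),
--         (0, 0, -1),
--     ]
--
--     total_adj = 0
--     for p in all_p:
--         for a in adj:
--             adj_p = tuple(p + a for p, a in zip(p, a))
--             if adj_p in all_p:
--                 total_adj += 1
--
--     return 6 * len(all_p) - total_adj
-- ===== SOURCE B (Python) =====
-- def get_sf(all_p):
--     # Axis-projection: for each axis, group voxels into axis-parallel lines keyed by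
--     # the other two coordinates; each maximal contiguous run in a line exposes 2 faces.
--     total = 0
--     for pairs in ([((y, z), x) for (x, y, z) in all_p],
--                   [((x, z), y) for (x, y, z) in all_p],
--                   [((x, y), z) for (x, y, z) in all_p]):
--         lines = {}
--         for k, c in pairs:
--             lines[k] = lines.get(k, []) + [c]
--         for cs in lines.values():
--             prev = None
--             for c in sorted(cs):
--                 if prev is None or c - prev != 1:
--                     total += 2
--                 prev = c
--     return total
-- ===== Notes on version B (the rewrite author's own statement) =====
-- stated objective: alternative
-- what changed: B computes the surface area by axis projection: for each of the three axes it groups voxels into axis-parallel lines keyed by the other two coordinates, sorts each line, and adds 2 faces per maximal contiguous run, instead of A's per-voxel scan of six neighbor offsets with linear list membership.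
import Mathlib
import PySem

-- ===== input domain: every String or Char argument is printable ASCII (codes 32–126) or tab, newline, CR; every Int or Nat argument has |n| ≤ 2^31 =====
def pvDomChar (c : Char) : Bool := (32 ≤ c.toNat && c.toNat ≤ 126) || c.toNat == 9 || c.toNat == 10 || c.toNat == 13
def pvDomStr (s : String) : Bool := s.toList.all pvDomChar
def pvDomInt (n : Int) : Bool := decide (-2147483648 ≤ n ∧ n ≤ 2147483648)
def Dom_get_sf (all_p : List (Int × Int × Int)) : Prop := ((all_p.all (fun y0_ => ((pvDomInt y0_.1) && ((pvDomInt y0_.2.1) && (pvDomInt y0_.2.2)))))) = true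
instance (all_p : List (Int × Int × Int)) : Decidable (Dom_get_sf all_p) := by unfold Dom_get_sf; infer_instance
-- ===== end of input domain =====

-- B computes surface area by axis projection (group voxels into axis-parallel lines,
-- 2 faces per maximal contiguous run) instead of A's per-voxel six-neighbor membership scan;
-- equal on duplicate-free input (the parameter is a Python set).


-- ===== PORT A =====
def pvAdjA : List (Int × Int × Int) :=
  [(1, 0, 0), (-1, 0, 0), (0, 1, 0), (0, -1, 0), (0, 0, 1), (0, 0, -1)]

def get_sf (all_p : List (Int × Int × Int)) : Int :=
  let total_adj : Int := all_p.foldl (fun acc p =>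
    pvAdjA.foldl (fun acc a =>
      if (p.1 + a.1, p.2.1 + a.2.1, p.2.2 + a.2.2) ∈ all_p then acc + 1 else acc) acc) 0
  6 * (all_p.length : Int) - total_adj

-- ===== PORT B =====
-- 'lines[k] = lines.get(k, []) + [c]' is Dict.modify k [] (· ++ [c])
def pvGroup (pairs : List ((Int × Int) × Int)) : PySem.Dict (Int × Int) (List Int) :=
  pairs.foldl (fun d p => d.modify p.1 [] (fun l => l ++ [p.2])) PySem.Dict.empty

-- the inner 'for c in sorted(cs)' loop: returns the amount added to total
def pvScanLine : Option Int → List Int → Int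
  | _, [] => 0
  | none, c :: cs => 2 + pvScanLine (some c) cs
  | some q, c :: cs => (if c - q ≠ 1 then 2 else 0) + pvScanLine (some c) cs

def pvAxisTotal (pairs : List ((Int × Int) × Int)) : Int :=
  (pvGroup pairs).values.foldl
    (fun total cs => total + pvScanLine none (PySem.List.sorted cs (fun c => c) false)) 0

def get_sf_alt (all_p : List (Int × Int × Int)) : Int :=
  pvAxisTotal (all_p.map (fun p => ((p.2.1, p.2.2), p.1)))
  + pvAxisTotal (all_p.map (fun p => ((p.1, p.2.2), p.2.1)))
  + pvAxisTotal (all_p.map (fun p => ((p.1, p.2.1), p.2.2)))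

-- ===== PRECONDITION & SPEC =====
-- The parameter is a Python set of voxels; Pre_ requires distinct elements. On a list
-- carrying duplicates A's len/membership arithmetic double-counts voxels accidentally
-- and B (which groups by coordinates) defensibly differs.
def Pre_get_sf (all_p : List (Int × Int × Int)) : Prop := all_p.Nodup
instance (all_p : List (Int × Int × Int)) : Decidable (Pre_get_sf all_p) := by unfold Pre_get_sf; infer_instance
def pvWitness_get_sf : (List (Int × Int × Int)) := [(0, 0, 0), (1, 0, 0)]

def Spec_get_sf (all_p : List (Int × Int × Int)) (out : Int) : Prop := out = get_sf_alt all_p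
instance (all_p : List (Int × Int × Int)) (out : Int) : Decidable (Spec_get_sf all_p out) := by unfold Spec_get_sf; infer_instance

-- ===== CLAIM (what is proved, stated in full; the proofs are below) =====
def Claim_equal_get_sf : Prop := ∀ (all_p : List (Int × Int × Int)), Dom_get_sf all_p → Pre_get_sf all_p → Spec_get_sf all_p (get_sf all_p)

-- ===== LEMMAS AND PROOFS =====

-- indicator sum = countP
theorem pv_sum_if (c : (Int × Int × Int) → Prop) [DecidablePred c] :
    ∀ (L : List (Int × Int × Int)),
      (L.map (fun p => if c p then (1 : Int) else 0)).sum = (L.countP (fun p => decide (c p)) : Int) := by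
  intro L
  induction L with
  | nil => simp
  | cons x xs ih =>
      simp only [List.map_cons, List.sum_cons, List.countP_cons, ih, decide_eq_true_eq]
      split_ifs with h <;> push_cast <;> ring

-- sum of a pointwise sum splits
theorem pv_sum_map_add (f g : (Int × Int × Int) → Int) :
    ∀ (L : List (Int × Int × Int)),
      (L.map (fun p => f p + g p)).sum = (L.map f).sum + (L.map g).sum := by
  intro L
  induction L with
  | nil => simp
  | cons x xs ih => simp [ih]; ring

-- shift symmetry: on a duplicate-free list, as many elements have their σ-shift
-- in the list as have their τ-shift in it, when σ and τ are mutually inverse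
theorem pv_countP_shift (L : List (Int × Int × Int)) (h : L.Nodup)
    (σ τ : (Int × Int × Int) → (Int × Int × Int))
    (hστ : ∀ x, τ (σ x) = x) (hτσ : ∀ x, σ (τ x) = x) :
    L.countP (fun q => decide (σ q ∈ L)) = L.countP (fun q => decide (τ q ∈ L)) := by
  have hinj : Function.Injective σ := by
    intro a b hab
    have := congrArg τ hab
    simpa [hστ] using this
  have h1 : ((L.filter (fun q => decide (σ q ∈ L))).map σ).Nodup :=
    ((h.filter _).map hinj)
  have h2 : (L.filter (fun q => decide (τ q ∈ L))).Nodup := h.filter _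
  have hmem : ∀ y, y ∈ (L.filter (fun q => decide (σ q ∈ L))).map σ ↔
      y ∈ L.filter (fun q => decide (τ q ∈ L)) := by
    intro y
    simp only [List.mem_map, List.mem_filter, decide_eq_true_eq]
    constructor
    · rintro ⟨x, ⟨hxL, hσx⟩, rfl⟩
      exact ⟨hσx, by simpa [hστ] using hxL⟩
    · rintro ⟨hyL, hτy⟩
      exact ⟨τ y, ⟨hτy, by simpa [hτσ] using hyL⟩, hτσ y⟩
  have hperm : ((L.filter (fun q => decide (σ q ∈ L))).map σ).Perm
      (L.filter (fun q => decide (τ q ∈ L))) :=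
    (List.perm_ext_iff_of_nodup h1 h2).2 hmem
  have := hperm.length_eq
  simpa [List.countP_eq_length_filter] using this

-- A's inner loop over the six offsets, as a sum of indicators
theorem pv_innerA (M : List (Int × Int × Int)) (p : Int × Int × Int) (acc : Int) :
    pvAdjA.foldl (fun acc a =>
      if (p.1 + a.1, p.2.1 + a.2.1, p.2.2 + a.2.2) ∈ M then acc + 1 else acc) acc =
    acc + ((if (p.1 + 1, p.2.1, p.2.2) ∈ M then (1:Int) else 0)
         + (if (p.1 + -1, p.2.1, p.2.2) ∈ M then (1:Int) else 0)
         + (if (p.1, p.2.1 + 1, p.2.2) ∈ M then (1:Int) else 0)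
         + (if (p.1, p.2.1 + -1, p.2.2) ∈ M then (1:Int) else 0)
         + (if (p.1, p.2.1, p.2.2 + 1) ∈ M then (1:Int) else 0)
         + (if (p.1, p.2.1, p.2.2 + -1) ∈ M then (1:Int) else 0)) := by
  simp only [pvAdjA, List.foldl_cons, List.foldl_nil, add_zero]
  split_ifs <;> ring

-- A's outer loop, as a map-sum (membership list M stays fixed)
theorem pv_totalA (M : List (Int × Int × Int)) :
    ∀ (L : List (Int × Int × Int)) (c : Int),
      L.foldl (fun acc p =>
        pvAdjA.foldl (fun acc a =>
          if (p.1 + a.1, p.2.1 + a.2.1, p.2.2 + a.2.2) ∈ M then acc + 1 else acc) acc) c =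
      c + (L.map (fun p =>
           (if (p.1 + 1, p.2.1, p.2.2) ∈ M then (1:Int) else 0)
         + (if (p.1 + -1, p.2.1, p.2.2) ∈ M then (1:Int) else 0)
         + (if (p.1, p.2.1 + 1, p.2.2) ∈ M then (1:Int) else 0)
         + (if (p.1, p.2.1 + -1, p.2.2) ∈ M then (1:Int) else 0)
         + (if (p.1, p.2.1, p.2.2 + 1) ∈ M then (1:Int) else 0)
         + (if (p.1, p.2.1, p.2.2 + -1) ∈ M then (1:Int) else 0))).sum := by
  intro L
  induction L with
  | nil => intro c; simp
  | cons x xs ih =>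
      intro c
      rw [List.foldl_cons, ih, pv_innerA]
      simp only [List.map_cons, List.sum_cons]
      ring

theorem pv_scan_some :
    ∀ (s : List Int), s.Pairwise (· < ·) → ∀ q, (∀ t ∈ s, q < t) →
      pvScanLine (some q) s =
        2 * ((s.length : Int) - (s.countP (fun c => decide (c + 1 ∈ s)) : Int))
        - (if q + 1 ∈ s then 2 else 0) := by
  intro s
  induction s with
  | nil => intro _ q _; simp [pvScanLine]
  | cons c cs ih =>
      intro hp q hq
      have hclt : ∀ t ∈ cs, c < t := fun t ht => (List.pairwise_cons.1 hp).1 t ht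
      have hcs : cs.Pairwise (· < ·) := (List.pairwise_cons.1 hp).2
      have hqc : q < c := hq c (List.mem_cons_self ..)
      have hcong : cs.countP (fun x => decide (x + 1 ∈ c :: cs)) = cs.countP (fun x => decide (x + 1 ∈ cs)) := by
        apply List.countP_congr
        intro x hx
        have hcx : c < x := hclt x hx
        simp only [decide_eq_true_eq, List.mem_cons]
        constructor
        · rintro (h | h)
          · exfalso; omega
          · exact h
        · exact Or.inr
      have hc1 : decide (c + 1 ∈ (c :: cs)) = decide (c + 1 ∈ cs) := by
        rw [decide_eq_decide, List.mem_cons]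
        constructor
        · rintro (h | h)
          · exfalso; omega
          · exact h
        · exact Or.inr
      have hq1 : (q + 1 ∈ (c :: cs)) ↔ (c = q + 1) := by
        rw [List.mem_cons]
        constructor
        · rintro (h | h)
          · omega
          · exact absurd (hclt _ h) (by omega)
        · intro h; exact Or.inl h.symm
      rw [pvScanLine, ih hcs c hclt]
      simp only [List.countP_cons, List.length_cons, hcong, hc1]
      rw [if_congr hq1 rfl rfl]
      simp only [decide_eq_true_eq]
      split_ifs <;> push_cast <;> omega

theorem pv_scan_none (s : List Int) (h : s.Pairwise (· < ·)) :
    pvScanLine none s =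
      2 * ((s.length : Int) - (s.countP (fun c => decide (c + 1 ∈ s)) : Int)) := by
  cases s with
  | nil => simp [pvScanLine]
  | cons c cs =>
      have hclt : ∀ t ∈ cs, c < t := fun t ht => (List.pairwise_cons.1 h).1 t ht
      have hcs : cs.Pairwise (· < ·) := (List.pairwise_cons.1 h).2
      have hcong : cs.countP (fun x => decide (x + 1 ∈ c :: cs)) = cs.countP (fun x => decide (x + 1 ∈ cs)) := by
        apply List.countP_congr
        intro x hx
        have hcx : c < x := hclt x hx
        simp only [decide_eq_true_eq, List.mem_cons]
        constructor
        · rintro (h | h)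
          · exfalso; omega
          · exact h
        · exact Or.inr
      have hc1 : decide (c + 1 ∈ (c :: cs)) = decide (c + 1 ∈ cs) := by
        rw [decide_eq_decide, List.mem_cons]
        constructor
        · rintro (h | h)
          · exfalso; omega
          · exact h
        · exact Or.inr
      rw [pvScanLine, pv_scan_some cs hcs c hclt]
      simp only [List.countP_cons, List.length_cons, hcong, hc1, decide_eq_true_eq]
      split_ifs <;> push_cast <;> omega

theorem pv_sum_indicator (x : Int × Int) (v : Int) :
    ∀ (K : List (Int × Int)), K.Nodup → x ∈ K →
      (K.map (fun k => if x == k then v else 0)).sum = v := by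
  intro K
  induction K with
  | nil => simp
  | cons k ks ih =>
      intro hnd hx
      rcases List.mem_cons.1 hx with rfl | hx'
      · have : ∀ k' ∈ ks, ¬ (x == k') = true := by
          intro k' hk' h
          exact (List.nodup_cons.1 hnd).1 (by simpa using (beq_iff_eq.1 h) ▸ hk')
        simp only [List.map_cons, List.sum_cons, beq_self_eq_true, if_true]
        have hz : (ks.map (fun k => if x == k then v else 0)).sum = 0 := by
          rw [List.sum_eq_zero]
          intro y hy
          rcases List.mem_map.1 hy with ⟨k', hk', rfl⟩
          simp [this k' hk']
        rw [hz]; ring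
      · have hne : ¬ (x == k) = true := by
          intro h
          exact (List.nodup_cons.1 hnd).1 ((beq_iff_eq.1 h) ▸ hx')
        simp only [List.map_cons, List.sum_cons, if_neg hne,
          ih (List.nodup_cons.1 hnd).2 hx', zero_add]

theorem pv_partition (pred : ((Int × Int) × Int) → Bool) :
    ∀ (pairs : List ((Int × Int) × Int)) (K : List (Int × Int)), K.Nodup →
      (∀ p ∈ pairs, p.1 ∈ K) →
      (K.map (fun k => (((pairs.filter (fun p => p.1 == k)).countP pred : Nat) : Int))).sum
        = ((pairs.countP pred : Nat) : Int) := by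
  intro pairs
  induction pairs with
  | nil => intro K _ _; simp
  | cons p ps ih =>
      intro K hnd hmem
      have hmem' : ∀ q ∈ ps, q.1 ∈ K := fun q hq => hmem q (List.mem_cons_of_mem _ hq)
      have step : ∀ k ∈ K, (((p :: ps).filter (fun q => q.1 == k)).countP pred : Int)
          = (((ps.filter (fun q => q.1 == k)).countP pred : Nat) : Int)
            + (if p.1 == k then (if pred p then (1:Int) else 0) else 0) := by
        intro k _
        simp only [List.filter_cons]
        by_cases h : (p.1 == k) = true
        · simp only [h, if_true, List.countP_cons]
          by_cases hp : pred p = true <;> simp [hp]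
        · simp [h]
      rw [List.map_congr_left step, List.sum_map_add,
        ih K hnd hmem', pv_sum_indicator p.1 _ K hnd (hmem p (List.mem_cons_self ..)),
        List.countP_cons]
      by_cases hp : pred p = true <;> simp [hp]

theorem pv_sum_map_two_sub (f g : (Int × Int) → Int) :
    ∀ (K : List (Int × Int)),
      (K.map (fun k => 2 * (f k - g k))).sum = 2 * ((K.map f).sum - (K.map g).sum) := by
  intro K
  induction K with
  | nil => simp
  | cons k ks ih => simp [ih]; ring

theorem pv_axis (pairs : List ((Int × Int) × Int)) (hnd : pairs.Nodup) :
    pvAxisTotal pairs =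
      2 * ((pairs.length : Int)
        - (pairs.countP (fun p => decide ((p.1, p.2 + 1) ∈ pairs)) : Int)) := by
  have hK : (pvGroup pairs).keys.Nodup := by
    unfold pvGroup
    apply PySem.Dict.nodup_keys_foldl_modify_key
    simp [PySem.Dict.empty]
  have hkeys : (pvGroup pairs).keys = PySem.Set.update [] (pairs.map (·.1)) := by
    unfold pvGroup
    rw [PySem.Dict.keys_foldl_modify_key]
    rfl
  have hmemK : ∀ p ∈ pairs, p.1 ∈ (pvGroup pairs).keys := by
    intro p hp
    rw [hkeys, PySem.Set.mem_update]
    exact Or.inr (List.mem_map_of_mem hp)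
  have hgetD : ∀ k, (pvGroup pairs).getD k [] = (pairs.filter (fun p => p.1 == k)).map (·.2) := by
    intro k
    unfold pvGroup
    rw [PySem.Dict.getD_foldl_modify_append]
    simp
  -- the group of key k, and its properties
  set g : (Int × Int) → List Int := fun k => (pairs.filter (fun p => p.1 == k)).map (·.2) with hg
  have hmemg : ∀ k x, x ∈ g k ↔ (k, x) ∈ pairs := by
    intro k x
    simp only [hg, List.mem_map, List.mem_filter, beq_iff_eq]
    constructor
    · rintro ⟨p, ⟨hp, rfl⟩, rfl⟩
      exact (Prod.mk.eta (p := p)) ▸ hp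
    · intro h
      exact ⟨(k, x), ⟨h, rfl⟩, rfl⟩
  have hgnd : ∀ k, (g k).Nodup := by
    intro k
    apply List.Nodup.map_on
    · intro a ha b hb hab
      have ha1 : a.1 = k := beq_iff_eq.1 (List.mem_filter.1 ha).2
      have hb1 : b.1 = k := beq_iff_eq.1 (List.mem_filter.1 hb).2
      cases a; cases b
      simp_all
    · exact hnd.filter _
  -- scan of a sorted group
  have hscan : ∀ k, pvScanLine none (PySem.List.sorted (g k) (fun c => c) false)
      = 2 * (((g k).length : Int) - ((g k).countP (fun c => decide ((k, c + 1) ∈ pairs)) : Int)) := by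
    intro k
    set s := PySem.List.sorted (g k) (fun c => c) false with hs
    have hperm : s.Perm (g k) := PySem.List.sorted_perm ..
    have hsnd : s.Nodup := hperm.nodup_iff.2 (hgnd k)
    have hpw : s.Pairwise (· < ·) := by
      have h1 := PySem.List.sorted_pairwise (xs := g k) (key := fun c => c)
      exact ((hs ▸ h1).and hsnd).imp (by intro a b ⟨hle, hne⟩; exact lt_of_le_of_ne hle hne)
    rw [pv_scan_none s hpw]
    have hlen : s.length = (g k).length := hperm.length_eq
    have hcnt : s.countP (fun c => decide (c + 1 ∈ s))
        = (g k).countP (fun c => decide ((k, c + 1) ∈ pairs)) := by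
      have h1 : s.countP (fun c => decide (c + 1 ∈ s))
          = s.countP (fun c => decide ((k, c + 1) ∈ pairs)) :=
        List.countP_congr (fun x _ => by simp only [decide_eq_true_eq]; rw [hperm.mem_iff, hmemg])
      rw [h1]
      exact hperm.countP_eq _
    rw [hlen, hcnt]
  -- total over values
  have hvals : (pvGroup pairs).values = (pvGroup pairs).keys.map (fun k => g k) := by
    rw [PySem.Dict.values_eq_map_keys _ hK []]
    exact List.map_congr_left (fun k _ => hgetD k)
  rw [pvAxisTotal, hvals, PySem.List.foldl_add]
  rw [List.map_map]
  simp only [Function.comp_def]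
  have : ((pvGroup pairs).keys.map
      (fun k => pvScanLine none (PySem.List.sorted (g k) (fun c => c) false))).sum
      = ((pvGroup pairs).keys.map (fun k =>
          2 * ((((pairs.filter (fun p => p.1 == k)).countP (fun _ => true) : Nat) : Int)
             - (((pairs.filter (fun p => p.1 == k)).countP
                  (fun p => decide ((p.1, p.2 + 1) ∈ pairs)) : Nat) : Int)))).sum := by
    apply congrArg List.sum
    apply List.map_congr_left
    intro k _
    rw [hscan k]
    congr 1
    congr 1
    · congr 1
      simp [hg, List.countP_true]
    · congr 1
      rw [hg]
      simp only [List.countP_map]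
      apply List.countP_congr
      intro p hp
      have : p.1 = k := beq_iff_eq.1 (List.mem_filter.1 hp).2
      simp [Function.comp, this]
  rw [this, pv_sum_map_two_sub, pv_partition _ pairs _ hK hmemK, pv_partition _ pairs _ hK hmemK]
  simp [List.countP_true]

-- per axis: the grouped count over the projected pairs is the shift count over L
theorem pv_axis_shift (L : List (Int × Int × Int)) (hnd : L.Nodup)
    (f : (Int × Int × Int) → ((Int × Int) × Int))
    (σ : (Int × Int × Int) → (Int × Int × Int))
    (hinj : Function.Injective f)
    (hcomm : ∀ p, ((f p).1, (f p).2 + 1) = f (σ p)) :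
    pvAxisTotal (L.map f) =
      2 * ((L.length : Int) - (L.countP (fun p => decide (σ p ∈ L)) : Int)) := by
  rw [pv_axis _ (hnd.map hinj), List.length_map, List.countP_map]
  congr 2
  exact congrArg Nat.cast (List.countP_congr (fun p _ => by
    simp only [Function.comp_apply, decide_eq_true_eq]
    rw [hcomm p, List.mem_map_of_injective hinj]))


-- ===== VERDICT (by name: the statement is the Claim_ definition above) =====
theorem get_sf_spec : Claim_equal_get_sf := by
  intro L _ hpre
  unfold Spec_get_sf get_sf get_sf_alt
  have hx := pv_axis_shift L hpre (fun p => ((p.2.1, p.2.2), p.1))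
    (fun p => (p.1 + 1, p.2.1, p.2.2))
    (fun a b h => by
      obtain ⟨a1, a2, a3⟩ := a; obtain ⟨b1, b2, b3⟩ := b
      simp only [Prod.ext_iff] at h ⊢
      tauto)
    (fun p => rfl)
  have hy := pv_axis_shift L hpre (fun p => ((p.1, p.2.2), p.2.1))
    (fun p => (p.1, p.2.1 + 1, p.2.2))
    (fun a b h => by
      obtain ⟨a1, a2, a3⟩ := a; obtain ⟨b1, b2, b3⟩ := b
      simp only [Prod.ext_iff] at h ⊢
      tauto)
    (fun p => rfl)
  have hz := pv_axis_shift L hpre (fun p => ((p.1, p.2.1), p.2.2))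
    (fun p => (p.1, p.2.1, p.2.2 + 1))
    (fun a b h => by
      obtain ⟨a1, a2, a3⟩ := a; obtain ⟨b1, b2, b3⟩ := b
      simp only [Prod.ext_iff] at h ⊢
      tauto)
    (fun p => rfl)
  rw [hx, hy, hz]
  simp only [pv_totalA, zero_add, pv_sum_map_add, pv_sum_if]
  have h1 : L.countP (fun q => decide ((q.1 + -1, q.2.1, q.2.2) ∈ L))
      = L.countP (fun q => decide ((q.1 + 1, q.2.1, q.2.2) ∈ L)) :=
    pv_countP_shift L hpre (fun p => (p.1 + -1, p.2.1, p.2.2)) (fun p => (p.1 + 1, p.2.1, p.2.2))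
      (fun x => by obtain ⟨a, b, c⟩ := x; simp)
      (fun x => by obtain ⟨a, b, c⟩ := x; simp)
  have h2 : L.countP (fun q => decide ((q.1, q.2.1 + -1, q.2.2) ∈ L))
      = L.countP (fun q => decide ((q.1, q.2.1 + 1, q.2.2) ∈ L)) :=
    pv_countP_shift L hpre (fun p => (p.1, p.2.1 + -1, p.2.2)) (fun p => (p.1, p.2.1 + 1, p.2.2))
      (fun x => by obtain ⟨a, b, c⟩ := x; simp)
      (fun x => by obtain ⟨a, b, c⟩ := x; simp)
  have h3 : L.countP (fun q => decide ((q.1, q.2.1, q.2.2 + -1) ∈ L))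
      = L.countP (fun q => decide ((q.1, q.2.1, q.2.2 + 1) ∈ L)) :=
    pv_countP_shift L hpre (fun p => (p.1, p.2.1, p.2.2 + -1)) (fun p => (p.1, p.2.1, p.2.2 + 1))
      (fun x => by obtain ⟨a, b, c⟩ := x; simp)
      (fun x => by obtain ⟨a, b, c⟩ := x; simp)
  rw [h1, h2, h3]
  ring
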